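-- pv_equiv track=rewrite | github.com/Skylake-dev/aoc | 2024/python/12.py | build_contiguous_sections
-- ===== SOURCE A (Python) =====
-- def build_contiguous_sections(points: list[int]) -> list[list[int]]:
--     # first extract contiguous blocks by checking delta between points
--     if len(points) == 0:
--         # empty, so return empty list
--         return []
--     contiguous_sections: list[list[int]] = [[points[0]]]
--     for i in range(1, len(points)):
--         if points[i] == points[i-1] + 1:
--             # it's contiguous, keep appending to the current array
--             contiguous_sections[-1].append(points[i])
--         else:
--             # not contiguous, create a new block
--             contiguous_sections.append([points[i]])
--     return contiguous_sections
-- ===== SOURCE B (Python) =====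
-- def build_contiguous_sections(points: list[int]) -> list[list[int]]:
--     # two-pointer run extraction: advance j to the end of each consecutive run,
--     # then slice the run out in one piece
--     result: list[list[int]] = []
--     i = 0
--     n = len(points)
--     while i < n:
--         j = i + 1
--         while j < n and points[j] == points[j - 1] + 1:
--             j += 1
--         result.append(points[i:j])
--         i = j
--     return result
-- ===== Notes on version B (the rewrite author's own statement) =====
-- stated objective: alternative
-- what changed: B extracts each maximal consecutive run with a two-pointer scan and slices it out whole, instead of A's single loop that mutates the last block of the accumulator element by element.
import Mathlib
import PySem

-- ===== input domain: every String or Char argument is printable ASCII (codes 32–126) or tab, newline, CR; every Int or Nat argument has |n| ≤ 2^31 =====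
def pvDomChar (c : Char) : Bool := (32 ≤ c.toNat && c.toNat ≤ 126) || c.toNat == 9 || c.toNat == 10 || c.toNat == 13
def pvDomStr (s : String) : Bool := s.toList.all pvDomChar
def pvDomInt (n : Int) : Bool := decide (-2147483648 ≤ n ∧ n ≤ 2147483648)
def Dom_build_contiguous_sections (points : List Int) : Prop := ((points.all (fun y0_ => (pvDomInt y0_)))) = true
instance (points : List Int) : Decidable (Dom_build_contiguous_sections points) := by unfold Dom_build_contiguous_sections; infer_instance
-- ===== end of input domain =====

-- B is an alternative decomposition (two-pointer run extraction) of A's delta-check loop; equal return value proved on all inputs.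

-- ===== PORT A =====
-- A's loop 'for i in range(1, len(points))' reads points[i] and points[i-1]; it is
-- transliterated as a foldl over the adjacent pairs (points[i-1], points[i]), i.e.
-- points.zip points.tail — exact, since every index the loop uses is in range.
def build_contiguous_sections (points : List Int) : List (List Int) :=
  match points with
  | [] => []
  | p0 :: rest =>
    ((p0 :: rest).zip rest).foldl
      (fun cs pc =>
        if pc.2 = pc.1 + 1 then
          -- contiguous: append to the current (last) block
          cs.dropLast ++ [(cs.getLast?.getD []) ++ [pc.2]]
        else
          -- not contiguous: create a new block
          cs ++ [[pc.2]])
      [[p0]]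

-- ===== PORT B =====
-- inner while loop: consume the rest of a consecutive run starting after prev
def pvTakeRun : Int → List Int → List Int × List Int
  | _, [] => ([], [])
  | prev, x :: xs =>
    if x = prev + 1 then
      let r := pvTakeRun x xs
      (x :: r.1, r.2)
    else ([], x :: xs)

theorem pvTakeRun_snd_length : ∀ (prev : Int) (xs : List Int),
    (pvTakeRun prev xs).2.length ≤ xs.length := by
  intro prev xs
  induction xs generalizing prev with
  | nil => simp [pvTakeRun]
  | cons x xs ih =>
    simp only [pvTakeRun]
    split
    · exact Nat.le_succ_of_le (ih x)
    · simp

def build_contiguous_sections_alt (points : List Int) : List (List Int) :=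
  match points with
  | [] => []
  | x :: xs =>
    let r := pvTakeRun x xs
    (x :: r.1) :: build_contiguous_sections_alt r.2
termination_by points.length
decreasing_by
  simp only [List.length_cons]
  exact Nat.lt_succ_of_le (pvTakeRun_snd_length x xs)

-- ===== PRECONDITION & SPEC =====
def Spec_build_contiguous_sections (points : List Int) (out : List (List Int)) : Prop := out = build_contiguous_sections_alt points
instance (points : List Int) (out : List (List Int)) : Decidable (Spec_build_contiguous_sections points out) := by unfold Spec_build_contiguous_sections; infer_instance

-- ===== CLAIM (what is proved, stated in full; the proofs are below) =====
def Claim_equal_build_contiguous_sections : Prop := ∀ (points : List Int), Dom_build_contiguous_sections points → Spec_build_contiguous_sections points (build_contiguous_sections points)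

-- ===== LEMMAS AND PROOFS =====

-- equation lemmas for the well-founded definition of B's port
theorem pvAlt_nil : build_contiguous_sections_alt [] = [] := by
  rw [build_contiguous_sections_alt]

theorem pvAlt_cons (x : Int) (xs : List Int) :
    build_contiguous_sections_alt (x :: xs)
      = (x :: (pvTakeRun x xs).1) :: build_contiguous_sections_alt (pvTakeRun x xs).2 := by
  rw [build_contiguous_sections_alt]

-- functional description of A's remaining fold: current open block `cur`
-- (ending in `prev`), followed by the sections built from the rest
def pvConsume : List Int → Int → List Int → List (List Int)
  | cur, _, [] => [cur]
  | cur, prev, x :: xs =>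
    if x = prev + 1 then pvConsume (cur ++ [x]) x xs
    else cur :: pvConsume [x] x xs

theorem pvFoldA (xs : List Int) : ∀ (done : List (List Int)) (cur : List Int) (prev : Int),
    ((prev :: xs).zip xs).foldl
      (fun cs pc =>
        if pc.2 = pc.1 + 1 then
          cs.dropLast ++ [(cs.getLast?.getD []) ++ [pc.2]]
        else
          cs ++ [[pc.2]])
      (done ++ [cur])
    = done ++ pvConsume cur prev xs := by
  induction xs with
  | nil => intro done cur prev; simp [pvConsume]
  | cons x xs ih =>
    intro done cur prev
    simp only [List.zip_cons_cons, List.foldl_cons, pvConsume]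
    by_cases h : x = prev + 1
    · subst h
      rw [if_pos rfl, List.dropLast_concat, List.getLast?_concat]
      simpa using ih done (cur ++ [prev + 1]) (prev + 1)
    · simp only [if_neg h]
      rw [List.append_assoc done [cur] [[x]], ← List.append_assoc done]
      rw [ih (done ++ [cur]) [x] x]
      simp
  
theorem pvConsume_eq (xs : List Int) : ∀ (cur : List Int) (prev : Int),
    pvConsume cur prev xs
      = (cur ++ (pvTakeRun prev xs).1) :: build_contiguous_sections_alt (pvTakeRun prev xs).2 := by
  induction xs with
  | nil => intro cur prev; simp [pvConsume, pvTakeRun, pvAlt_nil]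
  | cons x xs ih =>
    intro cur prev
    simp only [pvConsume, pvTakeRun]
    by_cases h : x = prev + 1
    · simp only [if_pos h]
      rw [ih (cur ++ [x]) x]
      simp
    · simp only [if_neg h]
      rw [ih [x] x, pvAlt_cons]
      simp

-- ===== VERDICT (by name: the statement is the Claim_ definition above) =====
theorem build_contiguous_sections_spec : Claim_equal_build_contiguous_sections := by
  intro points _
  unfold Spec_build_contiguous_sections
  match points with
  | [] => rw [pvAlt_nil]; rfl
  | p0 :: rest =>
    show ((p0 :: rest).zip rest).foldl _ ([] ++ [[p0]]) = _
    rw [pvFoldA rest [] [p0] p0, pvConsume_eq, pvAlt_cons]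
    simp
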